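-- pv_equiv track=rewrite | github.com/echoziyicui/10601 | logisticRegression/tagger.py | featureName2Idx_1
-- ===== SOURCE A (Python) =====
-- def featureName2Idx_1(data):
--     idx = 0
--     feature2Idx = {}
--
--     # add bias as the first feature:
--     feature2Idx['bias'] = idx
--     idx = 1
--
--     for row in data:
--         if row != '\n':
--         #if len(row) != 0:
--             if row[0] not in feature2Idx:
--                 feature2Idx[row[0]] = idx
--                 idx += 1
--
--     return feature2Idx
-- ===== SOURCE B (Python) =====
-- def featureName2Idx_1(data):
--     # different strategy: gather the candidate keys, then sort the DISTINCT keys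
--     # by their first-occurrence position and read the indices off that order.
--     keys = ['bias'] + [row[0] for row in data if row != '\n']
--     return {k: i for i, k in enumerate(sorted(set(keys), key=keys.index))}
-- ===== Notes on version B (the rewrite author's own statement) =====
-- stated objective: alternative
-- what changed: Replaces A's incremental membership-tested counter loop by a sort-based pipeline: collect all candidate keys, then sort the distinct keys by their first-occurrence position (keys.index) and enumerate that sorted order; correctness rests on the fact that first-occurrence positions are strictly increasing along first occurrences.
import Mathlib
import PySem

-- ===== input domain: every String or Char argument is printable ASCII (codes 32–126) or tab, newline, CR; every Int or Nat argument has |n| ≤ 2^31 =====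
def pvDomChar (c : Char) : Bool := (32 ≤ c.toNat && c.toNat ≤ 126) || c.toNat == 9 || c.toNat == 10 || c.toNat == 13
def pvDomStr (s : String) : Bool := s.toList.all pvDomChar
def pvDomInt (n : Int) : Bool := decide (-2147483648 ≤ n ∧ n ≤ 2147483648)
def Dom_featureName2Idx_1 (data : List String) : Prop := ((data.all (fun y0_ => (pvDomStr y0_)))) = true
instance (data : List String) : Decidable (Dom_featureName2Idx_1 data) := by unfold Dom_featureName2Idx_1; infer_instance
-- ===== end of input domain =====

-- B replaces A's incremental counter loop by: collect candidate keys, sort the distinct keys by first-occurrence position, enumerate (alternative algorithm, same return value).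


-- row[0] as a one-character string (total form; under Pre_ the row is nonempty, so the default never fires)
def pvFirstChar (row : String) : String := String.ofList [((PySem.Str.pyGet? row 0).getD ' ')]

-- ===== PORT A =====
def featureName2Idx_1 (data : List String) : List (String × Int) :=
  (data.foldl (fun st row =>
    if row ≠ "\n" then
      let key := pvFirstChar row
      if st.1.contains key = false then (st.1.insert key st.2, st.2 + 1) else st
    else st) ((PySem.Dict.empty.insert "bias" 0 : PySem.Dict String Int), (1 : Int))).1.items

-- ===== PORT B =====
-- keys = ['bias'] + [row[0] for row in data if row != '\n']
def pvKeys (data : List String) : List String :=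
  "bias" :: (data.filter (fun row => row ≠ "\n")).map pvFirstChar

-- keys.index(k): every element of set(keys) occurs in keys, so index? is some; getD 0 is exact
def featureName2Idx_1_alt (data : List String) : List (String × Int) :=
  (PySem.List.enumerate (PySem.List.sorted (PySem.Set.ofList (pvKeys data))
      (fun k => (PySem.List.index? (pvKeys data) k).getD 0) false)).map (fun p => (p.2, p.1))

-- ===== PRECONDITION & SPEC =====
-- Pre_ excludes data containing an empty string: there A (and B) raise IndexError at row[0].
def Pre_featureName2Idx_1 (data : List String) : Prop := ∀ s ∈ data, s ≠ ""
instance (data : List String) : Decidable (Pre_featureName2Idx_1 data) := by unfold Pre_featureName2Idx_1; infer_instance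
def pvWitness_featureName2Idx_1 : List String := ["x y", "\n", "q r"]

def Spec_featureName2Idx_1 (data : List String) (out : List (String × Int)) : Prop := out = featureName2Idx_1_alt data
instance (data : List String) (out : List (String × Int)) : Decidable (Spec_featureName2Idx_1 data out) := by unfold Spec_featureName2Idx_1; infer_instance

-- ===== CLAIM (what is proved, stated in full; the proofs are below) =====
def Claim_equal_featureName2Idx_1 : Prop := ∀ (data : List String), Dom_featureName2Idx_1 data → Pre_featureName2Idx_1 data → Spec_featureName2Idx_1 data (featureName2Idx_1 data)

-- ===== LEMMAS AND PROOFS =====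

-- A's loop body acting on an already-extracted key
def pvStep (st : PySem.Dict String Int × Int) (k : String) : PySem.Dict String Int × Int :=
  if st.1.contains k = false then (st.1.insert k st.2, st.2 + 1) else st

-- items of the dict that indexes `seen` in order
def pvMkItems (seen : List String) : List (String × Int) :=
  (PySem.List.enumerate seen).map (fun p => (p.2, p.1))

-- first-occurrence position of k in xs (total form of keys.index)
def pvFIdx (xs : List String) (k : String) : Nat := (PySem.List.index? xs k).getD 0

lemma pvFoldl_filter_map (data : List String)
    (init : PySem.Dict String Int × Int) :
    data.foldl (fun st row =>
      if row ≠ "\n" then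
        let key := pvFirstChar row
        if st.1.contains key = false then (st.1.insert key st.2, st.2 + 1) else st
      else st) init
    = ((data.filter (fun row => row ≠ "\n")).map pvFirstChar).foldl pvStep init := by
  induction data generalizing init with
  | nil => rfl
  | cons r rs ih =>
    by_cases h : r = "\n"
    · simpa [h] using ih init
    · simpa [h, pvStep] using ih _

lemma pvKeys_mk (seen : List String) :
    (PySem.Dict.mk (pvMkItems seen)).keys = seen := by
  simp only [PySem.Dict.keys_mk, pvMkItems, List.map_map, Function.comp_def]
  simp [PySem.List.map_snd_enumerate]

lemma pvMain (ks seen : List String) (hnd : seen.Nodup) :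
    (ks.foldl pvStep (PySem.Dict.mk (pvMkItems seen), (seen.length : Int))).1.items
      = pvMkItems (ks.foldl PySem.Set.add seen) := by
  induction ks generalizing seen with
  | nil => simp
  | cons k ks ih =>
    simp only [List.foldl_cons]
    by_cases hk : k ∈ seen
    · have hc : (PySem.Dict.mk (pvMkItems seen)).contains k = true := by
        rw [PySem.Dict.contains_eq_decide_mem_keys, pvKeys_mk]
        simpa using hk
      rw [show pvStep (PySem.Dict.mk (pvMkItems seen), (seen.length : Int)) k
            = (PySem.Dict.mk (pvMkItems seen), (seen.length : Int)) by
          simp [pvStep, hc]]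
      rw [PySem.Set.add_of_mem hk]
      exact ih seen hnd
    · have hc : (PySem.Dict.mk (pvMkItems seen)).contains k = false := by
        rw [PySem.Dict.contains_eq_decide_mem_keys, pvKeys_mk]
        simpa using hk
      have hins : ((PySem.Dict.mk (pvMkItems seen)).insert k (seen.length : Int))
          = PySem.Dict.mk (pvMkItems (seen ++ [k])) := by
        apply PySem.Dict.ext
        rw [PySem.Dict.items_insert, hc]
        simp [pvMkItems, PySem.List.enumerate_append]
      rw [show pvStep (PySem.Dict.mk (pvMkItems seen), (seen.length : Int)) k
            = (PySem.Dict.mk (pvMkItems (seen ++ [k])), ((seen ++ [k]).length : Int)) by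
          simp [pvStep, hc, hins]]
      rw [PySem.Set.add_of_not_mem hk]
      exact ih (seen ++ [k]) (by simp [List.nodup_append, hnd]; exact fun a ha h => hk (h ▸ ha))

lemma pvInit_eq :
    (PySem.Dict.empty.insert "bias" 0 : PySem.Dict String Int)
      = PySem.Dict.mk (pvMkItems ["bias"]) := by decide

lemma pvDedup_cons_foldl (ks : List String) :
    PySem.List.dedup ("bias" :: ks) = ks.foldl PySem.Set.add ["bias"] := by
  rw [PySem.List.dedup_eq_ofList, PySem.Set.ofList_eq_foldl, List.foldl_cons]
  rfl

-- foldl Set.add appends the not-yet-seen first occurrences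
lemma pvFoldl_add_eq_append (xs : List String) (s : List String) :
    xs.foldl PySem.Set.add s = s ++ (PySem.List.dedup xs).filter (fun y => y ∉ s) := by
  induction xs generalizing s with
  | nil => simp
  | cons y ys ih =>
    have hded : PySem.List.dedup (y :: ys) = y :: (PySem.List.dedup ys).filter (fun z => z ≠ y) := by
      rw [PySem.List.dedup_eq_ofList, PySem.Set.ofList_eq_foldl, List.foldl_cons,
        show PySem.Set.add [] y = [y] from rfl, ih]
      simp
    rw [List.foldl_cons, hded]
    by_cases hy : y ∈ s
    · rw [PySem.Set.add_of_mem hy, ih]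
      congr 1
      rw [List.filter_cons_of_neg (by simp [hy]), List.filter_filter]
      apply List.filter_congr
      intro z _
      by_cases hz : z ∈ s <;> by_cases hzy : z = y <;> simp_all
    · rw [PySem.Set.add_of_not_mem hy, ih, List.filter_cons_of_pos (by simp [hy]),
        List.append_assoc]
      congr 1
      rw [List.singleton_append, List.filter_filter]
      congr 1
      apply List.filter_congr
      intro z _
      by_cases hz : z ∈ s <;> by_cases hzy : z = y <;> simp_all

lemma pvDedup_cons_filter (x : String) (xs : List String) :
    PySem.List.dedup (x :: xs) = x :: (PySem.List.dedup xs).filter (fun z => z ≠ x) := by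
  rw [PySem.List.dedup_eq_ofList, PySem.Set.ofList_eq_foldl, List.foldl_cons,
    show PySem.Set.add [] x = [x] from rfl, pvFoldl_add_eq_append]
  simp [PySem.List.dedup_eq_ofList]

-- first-occurrence positions are strictly increasing along the ordered dedup list
lemma pvPairwise_fidx (xs : List String) :
    (PySem.List.dedup xs).Pairwise (fun a b => pvFIdx xs a < pvFIdx xs b) := by
  induction xs with
  | nil => simp [PySem.List.dedup]
  | cons x xs ih =>
    rw [pvDedup_cons_filter]
    refine List.Pairwise.cons ?_ ?_
    · intro b hb
      have hbne : b ≠ x := by simpa using List.of_mem_filter hb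
      have hbmem : b ∈ xs := (PySem.List.mem_dedup xs b).mp (List.mem_of_mem_filter hb)
      obtain ⟨kb, hkb⟩ := Option.isSome_iff_exists.mp ((PySem.List.index?_isSome_iff xs b).mpr hbmem)
      simp only [pvFIdx, PySem.List.index?_cons_self,
        PySem.List.index?_cons_of_ne xs (Ne.symm hbne), hkb, Option.map_some, Option.getD_some]
      omega
    · refine List.Pairwise.imp_of_mem ?_ (ih.filter _)
      intro a b ha hb hab
      have hane : a ≠ x := by simpa using List.of_mem_filter ha
      have hbne : b ≠ x := by simpa using List.of_mem_filter hb
      have hamem : a ∈ xs := (PySem.List.mem_dedup xs a).mp (List.mem_of_mem_filter ha)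
      have hbmem : b ∈ xs := (PySem.List.mem_dedup xs b).mp (List.mem_of_mem_filter hb)
      obtain ⟨ka, hka⟩ := Option.isSome_iff_exists.mp ((PySem.List.index?_isSome_iff xs a).mpr hamem)
      obtain ⟨kb, hkb⟩ := Option.isSome_iff_exists.mp ((PySem.List.index?_isSome_iff xs b).mpr hbmem)
      simp only [pvFIdx, hka, hkb, Option.getD_some] at hab
      simp only [pvFIdx, PySem.List.index?_cons_of_ne xs (Ne.symm hane),
        PySem.List.index?_cons_of_ne xs (Ne.symm hbne), hka, hkb, Option.map_some, Option.getD_some]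
      omega

-- the sort in B is the identity: distinct keys come out in first-occurrence order
lemma pvSorted_eq_dedup (keys : List String) :
    PySem.List.sorted (PySem.Set.ofList keys)
      (fun k => (PySem.List.index? keys k).getD 0) false
    = PySem.List.dedup keys := by
  apply PySem.List.sorted_eq_of_perm_of_pairwise_lt
  · rw [PySem.List.dedup_eq_ofList]
  · exact pvPairwise_fidx keys

-- ===== VERDICT (by name: the statement is the Claim_ definition above) =====
theorem featureName2Idx_1_spec : Claim_equal_featureName2Idx_1 := by
  intro data _ _
  unfold Spec_featureName2Idx_1 featureName2Idx_1 featureName2Idx_1_alt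
  rw [pvFoldl_filter_map, pvInit_eq, pvSorted_eq_dedup]
  simp only [pvKeys]
  rw [pvDedup_cons_foldl]
  have h := pvMain ((data.filter (fun row => row ≠ "\n")).map pvFirstChar) ["bias"]
    (by simp)
  norm_num at h ⊢
  rw [h]
  rfl
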